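-- pv_equiv track=rewrite | github.com/tbtrung39/KHDL_K17A1_LAB | lab10/bài 11/5+6.py | get_base
-- ===== SOURCE A (Python) =====
-- def get_base(input_str):
--
--     if all(char in '01' for char in input_str):
--         return 2
--     elif all(char in '01234567' for char in input_str):
--         return 8
--     elif all(char in '0123456789ABCDEF' for char in input_str):
--         return 16
--     else:
--         return None
-- ===== SOURCE B (Python) =====
-- def get_base(input_str):
--     max_level = 0
--     for char in input_str:
--         if char in '01':
--             level = 0
--         elif char in '234567':
--             level = 1
--         elif char in '89ABCDEF':
--             level = 2
--         else:
--             return None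
--         if level > max_level:
--             max_level = level
--     return (2, 8, 16)[max_level]
-- ===== Notes on version B (the rewrite author's own statement) =====
-- stated objective: simpler
-- what changed: Single pass classifying each character into a required level (0/1/2) and tracking the maximum, instead of three separate all()-scans over the whole string.
import Mathlib
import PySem

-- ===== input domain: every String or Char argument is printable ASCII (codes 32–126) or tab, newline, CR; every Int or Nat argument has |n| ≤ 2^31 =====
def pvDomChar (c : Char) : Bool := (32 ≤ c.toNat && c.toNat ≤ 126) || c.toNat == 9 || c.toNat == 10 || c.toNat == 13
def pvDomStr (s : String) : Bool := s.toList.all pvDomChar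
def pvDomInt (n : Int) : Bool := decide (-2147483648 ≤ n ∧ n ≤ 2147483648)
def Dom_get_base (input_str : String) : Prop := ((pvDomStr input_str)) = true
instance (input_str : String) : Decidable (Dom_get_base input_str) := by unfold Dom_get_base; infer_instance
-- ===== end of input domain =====

-- B replaces A's three all()-scans by a single pass tracking the maximum required level; objective: simpler.
-- ===== PORT A =====
def get_base (input_str : String) : Option Int :=
  if input_str.toList.all (fun c => "01".toList.contains c) then some 2
  else if input_str.toList.all (fun c => "01234567".toList.contains c) then some 8
  else if input_str.toList.all (fun c => "0123456789ABCDEF".toList.contains c) then some 16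
  else none

-- ===== PORT B =====
def levelOf (c : Char) : Option Nat :=
  if "01".toList.contains c then some 0
  else if "234567".toList.contains c then some 1
  else if "89ABCDEF".toList.contains c then some 2
  else none

def stepB (st : Option Nat) (c : Char) : Option Nat :=
  match st, levelOf c with
  | some m, some l => some (if l > m then l else m)
  | _, _ => none

def get_base_alt (input_str : String) : Option Int :=
  match input_str.toList.foldl stepB (some 0) with
  | some 0 => some 2
  | some 1 => some 8
  | some 2 => some 16
  | _ => none

-- ===== PRECONDITION & SPEC =====
def Spec_get_base (input_str : String) (out : Option Int) : Prop := out = get_base_alt input_str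
instance (input_str : String) (out : Option Int) : Decidable (Spec_get_base input_str out) := by unfold Spec_get_base; infer_instance

-- ===== CLAIM (what is proved, stated in full; the proofs are below) =====
def Claim_equal_get_base : Prop := ∀ (input_str : String), Dom_get_base input_str → Spec_get_base input_str (get_base input_str)

-- ===== LEMMAS AND PROOFS =====

lemma fold_none (xs : List Char) : xs.foldl stepB none = none := by
  induction xs with
  | nil => rfl
  | cons c xs ih => simpa [stepB] using ih

lemma oct_eq (c : Char) :
    ("01234567".toList.contains c) = ("01".toList.contains c || "234567".toList.contains c) := by
  rw [Bool.eq_iff_iff]; simp; tauto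

lemma hex_eq (c : Char) :
    ("0123456789ABCDEF".toList.contains c) =
      ("01234567".toList.contains c || "89ABCDEF".toList.contains c) := by
  rw [Bool.eq_iff_iff]; simp; tauto

lemma all_mono {p q : Char → Bool} (h : ∀ c, p c = true → q c = true) (xs : List Char)
    (hx : xs.all p = true) : xs.all q = true := by
  rw [List.all_eq_true] at hx ⊢; exact fun c hc => h c (hx c hc)

lemma all01_oct (xs : List Char) (h : (xs.all fun c => "01".toList.contains c) = true) :
    (xs.all fun c => "01234567".toList.contains c) = true := by
  refine all_mono (fun c hc => ?_) xs h
  rw [oct_eq, hc, Bool.true_or]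

lemma allOct_hex (xs : List Char) (h : (xs.all fun c => "01234567".toList.contains c) = true) :
    (xs.all fun c => "0123456789ABCDEF".toList.contains c) = true := by
  refine all_mono (fun c hc => ?_) xs h
  rw [hex_eq, hc, Bool.true_or]

lemma fold_some (xs : List Char) (m : Nat) :
    xs.foldl stepB (some m) =
      Option.map (fun l => max m l) (xs.foldl stepB (some 0)) := by
  induction xs generalizing m with
  | nil => simp
  | cons c xs ih =>
    simp only [List.foldl_cons]
    cases h : levelOf c with
    | none => simp [stepB, h, fold_none]
    | some l =>
      simp only [stepB, h]
      rw [ih, ih (if l > 0 then l else 0)]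
      cases (xs.foldl stepB (some 0)) with
      | none => rfl
      | some k =>
        simp only [Option.map_some, Option.some.injEq, max_def]
        split_ifs <;> omega

lemma fold_char (xs : List Char) :
    xs.foldl stepB (some 0) =
      if xs.all (fun c => "01".toList.contains c) then some 0
      else if xs.all (fun c => "01234567".toList.contains c) then some 1
      else if xs.all (fun c => "0123456789ABCDEF".toList.contains c) then some 2
      else none := by
  induction xs with
  | nil => simp
  | cons c xs ih =>
    simp only [List.foldl_cons, List.all_cons]
    by_cases h0 : "01".toList.contains c = true
    · have h1 : "01234567".toList.contains c = true := by rw [oct_eq, h0, Bool.true_or]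
      have h2 : "0123456789ABCDEF".toList.contains c = true := by rw [hex_eq, h1, Bool.true_or]
      have e : stepB (some 0) c = some 0 := by
        simp only [stepB, levelOf]; rw [if_pos h0]; rfl
      rw [e, ih]
      simp only [h0, h1, h2, Bool.true_and]
    · have h0' : "01".toList.contains c = false := by simpa using h0
      by_cases h23 : "234567".toList.contains c = true
      · have h1 : "01234567".toList.contains c = true := by rw [oct_eq, h23, Bool.or_true]
        have h2 : "0123456789ABCDEF".toList.contains c = true := by rw [hex_eq, h1, Bool.true_or]
        have e : stepB (some 0) c = some 1 := by
          simp only [stepB, levelOf]; rw [if_neg h0, if_pos h23]; rfl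
        rw [e, fold_some xs 1, ih]
        simp only [h0', h1, h2, Bool.false_and, Bool.true_and, Bool.false_eq_true, if_false]
        split_ifs <;>
          first
          | rfl
          | decide
          | exact absurd (all01_oct xs ‹_›) ‹_›
      · have h23' : "234567".toList.contains c = false := by simpa using h23
        have h1' : "01234567".toList.contains c = false := by rw [oct_eq, h0', h23']; rfl
        by_cases h89 : "89ABCDEF".toList.contains c = true
        · have h2 : "0123456789ABCDEF".toList.contains c = true := by
            rw [hex_eq, h89, Bool.or_true]
          have e : stepB (some 0) c = some 2 := by
            simp only [stepB, levelOf]; rw [if_neg h0, if_neg h23, if_pos h89]; rfl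
          rw [e, fold_some xs 2, ih]
          simp only [h0', h1', h2, Bool.false_and, Bool.true_and, Bool.false_eq_true, if_false]
          split_ifs <;>
            first
            | rfl
            | decide
            | exact absurd (allOct_hex xs (all01_oct xs ‹_›)) ‹_›
            | exact absurd (allOct_hex xs ‹_›) ‹_›
        · have h89' : "89ABCDEF".toList.contains c = false := by simpa using h89
          have h2' : "0123456789ABCDEF".toList.contains c = false := by
            rw [hex_eq, h1', h89']; rfl
          have e : stepB (some 0) c = none := by
            simp only [stepB, levelOf]; rw [if_neg h0, if_neg h23, if_neg h89]
          rw [e, fold_none]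
          simp only [h0', h1', h2', Bool.false_and, Bool.false_eq_true, if_false]

-- ===== VERDICT =====
theorem get_base_spec : Claim_equal_get_base := by
  intro s _
  unfold Spec_get_base get_base get_base_alt
  rw [fold_char]
  split_ifs with h0 h1 h2 <;> simp
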